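-- pv_equiv track=rewrite | github.com/ustajan/Misc | N42/plot_n42_v2005.py | decompress_counted_zeros
-- ===== SOURCE A (Python) =====
-- def decompress_counted_zeros(data):
--     decompressed = []
--     i = 0
--     while i < len(data):
--         value = data[i]
--         if value != 0:
--             decompressed.append(value)
--             i += 1
--         else:
--             if i + 1 < len(data):
--                 zeros_count = data[i + 1]
--                 if zeros_count < 0:
--                     raise ValueError("Invalid zeros count: cannot be negative")
--                 decompressed.extend([0] * zeros_count)
--                 i += 2
--             else:
--                 raise ValueError("Invalid compression format: zero at end without count")
--     return decompressed
-- ===== SOURCE B (Python) =====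
-- def decompress_counted_zeros(data):
--     # stage 1: index-only pass computing the start position of every token,
--     # validating the format as a side condition
--     starts = []
--     i = 0
--     n = len(data)
--     while i < n:
--         starts.append(i)
--         i += 1 if data[i] != 0 else 2
--     if i > n:
--         raise ValueError("Invalid compression format: zero at end without count")
--     if any(data[s] == 0 and data[s + 1] < 0 for s in starts):
--         raise ValueError("Invalid zeros count: cannot be negative")
--     # stage 2: emit each token from its start position
--     return [x for s in starts
--               for x in ([data[s]] if data[s] != 0 else [0] * data[s + 1])]
-- ===== Notes on version B (the rewrite author's own statement) =====
-- stated objective: alternative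
-- what changed: Replaces A's single pass that interleaves validation with output building by staged passes: an index-only scan first computes the token start positions and validates the format, and the output is then emitted by a flat comprehension over those start indices.
import Mathlib
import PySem

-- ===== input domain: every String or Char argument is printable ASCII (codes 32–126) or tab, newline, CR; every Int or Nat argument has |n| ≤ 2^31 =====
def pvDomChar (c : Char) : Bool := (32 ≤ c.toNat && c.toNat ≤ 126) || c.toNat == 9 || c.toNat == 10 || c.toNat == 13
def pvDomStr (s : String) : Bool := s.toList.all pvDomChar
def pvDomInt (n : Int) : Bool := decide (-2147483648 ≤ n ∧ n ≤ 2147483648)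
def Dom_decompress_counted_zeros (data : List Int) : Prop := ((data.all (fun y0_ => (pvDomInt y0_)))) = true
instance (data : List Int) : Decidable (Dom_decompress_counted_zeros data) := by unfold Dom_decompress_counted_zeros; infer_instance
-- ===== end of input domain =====

-- B replaces A's single output-building pass by staged passes: an index-only scan
-- computing token start positions (and validating), then emission over the starts.


-- ===== PORT A =====
-- A's while loop over index i, advancing by 1 or 2 and appending to `decompressed`,
-- is ported as a tail recursion consuming the list with the accumulator `acc`.
-- On the two `raise ValueError` paths (excluded by Pre_) the port returns `acc`.
def pvGoA (acc : List Int) : List Int → List Int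
  | [] => acc
  | value :: rest =>
    if value ≠ 0 then pvGoA (acc ++ [value]) rest
    else
      match rest with
      | zeros_count :: rest' =>
        if zeros_count < 0 then acc    -- raise ValueError (outside Pre_)
        else pvGoA (acc ++ List.replicate zeros_count.toNat 0) rest'
      | [] => acc                      -- raise ValueError (outside Pre_)

def decompress_counted_zeros (data : List Int) : List Int := pvGoA [] data

-- ===== PORT B =====
-- Source B's stage-1 while loop: returns (starts, final value of i).
def pvScan (data : List Int) (i : Nat) : List Nat × Nat :=
  if h : i < data.length then
    let nxt := if data[i] ≠ 0 then i + 1 else i + 2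
    let r := pvScan data nxt
    (i :: r.1, r.2)
  else
    ([], i)
termination_by data.length - i
decreasing_by
  split <;> omega

-- Source B: stage 1, the two raise guards (raise paths return [], outside Pre_),
-- then the stage-2 flat comprehension. Every index s (and s+1 after a zero) is
-- in range by construction of the starts, so `getD s 0` is exactly Python's data[s].
def decompress_counted_zeros_alt (data : List Int) : List Int :=
  let r := pvScan data 0
  let starts := r.1
  if r.2 > data.length then []         -- raise ValueError (outside Pre_)
  else if starts.any (fun s => data.getD s 0 = 0 && data.getD (s + 1) 0 < 0) then []  -- raise (outside Pre_)
  else starts.flatMap (fun s =>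
    if data.getD s 0 ≠ 0 then [data.getD s 0]
    else List.replicate (data.getD (s + 1) 0).toNat 0)

-- ===== PRECONDITION & SPEC =====
-- Pre_ excludes exactly the inputs on which A raises ValueError: a 0 followed by
-- a negative count, or a trailing 0 with no count after it.
def pvValidRLE : List Int → Bool
  | [] => true
  | x :: rest =>
    if x ≠ 0 then pvValidRLE rest
    else
      match rest with
      | [] => false
      | c :: rest' => decide (0 ≤ c) && pvValidRLE rest'

def Pre_decompress_counted_zeros (data : List Int) : Prop := pvValidRLE data = true
instance (data : List Int) : Decidable (Pre_decompress_counted_zeros data) := by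
  unfold Pre_decompress_counted_zeros; infer_instance

def pvWitness_decompress_counted_zeros : List Int := [5, 0, 3, -2, 0, 0, 7]

def Spec_decompress_counted_zeros (data : List Int) (out : List Int) : Prop := out = decompress_counted_zeros_alt data
instance (data : List Int) (out : List Int) : Decidable (Spec_decompress_counted_zeros data out) := by unfold Spec_decompress_counted_zeros; infer_instance

-- ===== CLAIM (what is proved, stated in full; the proofs are below) =====
def Claim_equal_decompress_counted_zeros : Prop := ∀ (data : List Int), Dom_decompress_counted_zeros data → Pre_decompress_counted_zeros data → Spec_decompress_counted_zeros data (decompress_counted_zeros data)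

-- ===== LEMMAS AND PROOFS =====
-- Pure reference decode (A without the accumulator).
def pvDec : List Int → List Int
  | [] => []
  | v :: rest =>
    if v ≠ 0 then v :: pvDec rest
    else
      match rest with
      | [] => []
      | c :: r => if c < 0 then [] else List.replicate c.toNat 0 ++ pvDec r

theorem pvDec_cons_ne (v : Int) (rest : List Int) (h : v ≠ 0) :
    pvDec (v :: rest) = v :: pvDec rest := by
  cases rest <;> simp [pvDec, h]

theorem pvGoA_cons_ne (acc : List Int) (v : Int) (rest : List Int) (h : v ≠ 0) :
    pvGoA acc (v :: rest) = pvGoA (acc ++ [v]) rest := by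
  cases rest <;> simp [pvGoA, h]

theorem pvGoA_eq_pvDec_aux : ∀ (n : Nat) (data : List Int), data.length ≤ n →
    pvValidRLE data = true → ∀ acc, pvGoA acc data = acc ++ pvDec data := by
  intro n
  induction n with
  | zero =>
    intro data hlen _ acc
    have : data = [] := List.eq_nil_of_length_eq_zero (by omega)
    subst this; simp [pvGoA, pvDec]
  | succ n ih =>
    intro data hlen hv acc
    match data with
    | [] => simp [pvGoA, pvDec]
    | v :: rest =>
      by_cases hv0 : v = 0
      · subst hv0
        match rest with
        | [] => simp [pvValidRLE] at hv
        | c :: r =>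
          simp [pvValidRLE] at hv
          have hlen' : r.length ≤ n := by simp at hlen; omega
          simp [pvGoA, pvDec, if_neg (by omega : ¬ c < 0), ih r hlen' hv.2]
      · have hv' : pvValidRLE rest = true := by
          match rest with
          | [] => rfl
          | c :: r => simpa [pvValidRLE, hv0] using hv
        have hlen' : rest.length ≤ n := by simp at hlen; omega
        rw [pvGoA_cons_ne _ _ _ hv0, pvDec_cons_ne _ _ hv0, ih rest hlen' hv']
        simp

theorem pvGoA_eq_pvDec (data : List Int) (hv : pvValidRLE data = true) (acc : List Int) :
    pvGoA acc data = acc ++ pvDec data :=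
  pvGoA_eq_pvDec_aux data.length data le_rfl hv acc

-- Main invariant for B's stage-1 scan, over suffixes data.drop i.
theorem pvScan_inv (data : List Int) : ∀ i, i ≤ data.length →
    pvValidRLE (data.drop i) = true →
    (pvScan data i).2 ≤ data.length ∧
    (∀ s ∈ (pvScan data i).1,
        ¬ (data.getD s 0 = 0 ∧ data.getD (s + 1) 0 < 0)) ∧
    ((pvScan data i).1.flatMap (fun s =>
        if data.getD s 0 ≠ 0 then [data.getD s 0]
        else List.replicate (data.getD (s + 1) 0).toNat 0)) = pvDec (data.drop i) := by
  intro i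
  induction hn : data.length - i using Nat.strong_induction_on generalizing i with
  | _ n ih =>
  intro hile hv
  by_cases h : i < data.length
  · have hdrop : data.drop i = data[i] :: data.drop (i + 1) :=
      List.drop_eq_getElem_cons h
    have hgd : data.getD i 0 = data[i] := List.getD_eq_getElem data 0 h
    by_cases hz : data[i] = 0
    · -- zero token: validity forces a following count ≥ 0
      rw [hdrop, hz] at hv
      cases h1 : data.drop (i + 1) with
      | nil => rw [h1] at hv; simp [pvValidRLE] at hv
      | cons c r =>
        rw [h1] at hv
        simp [pvValidRLE] at hv
        obtain ⟨hc, hvr⟩ := hv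
        have h2 : i + 1 < data.length := by
          by_contra hcon
          have : data.drop (i + 1) = [] := List.drop_eq_nil_of_le (by omega)
          simp [this] at h1
        have hgd1 : data.getD (i + 1) 0 = data[i + 1] :=
          List.getD_eq_getElem data 0 h2
        have hdrop1 : data.drop (i + 1) = data[i + 1] :: data.drop (i + 2) := by
          have := List.drop_eq_getElem_cons h2 (l := data)
          simpa [show i + 1 + 1 = i + 2 by omega] using this
        have hci : data[i + 1] = c := by
          rw [h1] at hdrop1; exact ((List.cons.injEq _ _ _ _ ▸ hdrop1).1).symm
        have hr : data.drop (i + 2) = r := by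
          rw [h1] at hdrop1; exact ((List.cons.injEq _ _ _ _ ▸ hdrop1).2).symm
        have hrec := ih (data.length - (i + 2)) (by omega) (i + 2) rfl (by omega)
          (by rw [hr]; exact hvr)
        rw [pvScan.eq_def, dif_pos h]
        simp only [if_neg (by simp [hz] : ¬ data[i] ≠ 0)]
        refine ⟨hrec.1, ?_, ?_⟩
        · intro s hs
          rcases List.mem_cons.mp hs with hsi | hs'
          · subst hsi; rw [hgd1, hci]; intro hcon; omega
          · exact hrec.2.1 s hs'
        · rw [hdrop, h1]
          simp only [List.flatMap_cons, hgd, hz, hgd1, hci]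
          rw [pvDec]
          simp only [if_neg (by simp : ¬ (0 : Int) ≠ 0), if_neg (by omega : ¬ c < 0)]
          rw [← hr, hrec.2.2, hr]
    · -- nonzero token
      rw [hdrop] at hv
      have hv' : pvValidRLE (data.drop (i + 1)) = true := by
        cases hdr : data.drop (i + 1) with
        | nil => rfl
        | cons c r => rw [hdr] at hv; simpa [pvValidRLE, hz] using hv
      have hrec := ih (data.length - (i + 1)) (by omega) (i + 1) rfl (by omega) hv'
      rw [pvScan.eq_def, dif_pos h]
      simp only [if_pos (by simpa using hz : data[i] ≠ 0)]
      refine ⟨hrec.1, ?_, ?_⟩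
      · intro s hs
        rcases List.mem_cons.mp hs with hsi | hs'
        · subst hsi; rw [hgd]; intro hcon; exact hz hcon.1
        · exact hrec.2.1 s hs'
      · rw [hdrop]
        simp only [List.flatMap_cons, hgd, if_pos (by simpa using hz : data[i] ≠ 0)]
        rw [pvDec_cons_ne _ _ (by simpa using hz), hrec.2.2]
        simp
  · rw [pvScan.eq_def, dif_neg h]
    have hnil : data.drop i = [] := List.drop_eq_nil_of_le (by omega)
    rw [hnil]
    exact ⟨by omega, by simp, by simp [pvDec]⟩

-- ===== VERDICT (by name: the statement is the Claim_ definition above) =====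
theorem decompress_counted_zeros_spec : Claim_equal_decompress_counted_zeros := by
  intro data _ hpre
  unfold Spec_decompress_counted_zeros decompress_counted_zeros decompress_counted_zeros_alt
  have hv : pvValidRLE (data.drop 0) = true := by simpa using hpre
  obtain ⟨h1, h2, h3⟩ := pvScan_inv data 0 (by omega) hv
  simp only []
  rw [if_neg (by omega), if_neg ?hany]
  · rw [h3]
    simpa using pvGoA_eq_pvDec data hpre []
  case hany =>
    simp only [List.any_eq_true, Bool.and_eq_true, decide_eq_true_eq, not_exists, not_and]
    intro s hs h0 hlt
    exact (h2 s hs) ⟨h0, hlt⟩
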